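-- pv_equiv track=rewrite | github.com/LiuYangArt/HardsurfaceGameAssetToolkit | utils/image_utils.py | _finalize_regions
-- ===== SOURCE A (Python) =====
-- RegionBounds = dict[str, int]
--
-- def _finalize_regions(
--     region_bounds: list[RegionBounds],
--     min_region_pixels: int,
--     padding_pixels: int,
--     merge_gap_pixels: int,
--     width: int,
--     height: int,
-- ) -> tuple[list[RegionBounds], int]:
--     """把基础连通域转换为当前参数下的输出矩形。"""
--     ignored_small_regions = 0
--     regions = []
--
--     for region in region_bounds:
--         if region["pixel_count"] < min_region_pixels:
--             ignored_small_regions += 1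
--             continue
--
--         regions.append(
--             {
--                 "min_x": max(0, region["min_x"] - padding_pixels),
--                 "min_y": max(0, region["min_y"] - padding_pixels),
--                 "max_x": min(width - 1, region["max_x"] + padding_pixels),
--                 "max_y": min(height - 1, region["max_y"] + padding_pixels),
--                 "pixel_count": region["pixel_count"],
--             }
--         )
--
--     regions = merge_nearby_regions(regions, merge_gap_pixels=merge_gap_pixels)
--     regions.sort(key=lambda region: (-region["max_y"], region["min_x"]))
--     return regions, ignored_small_regions
--
-- def merge_nearby_regions(regions: list[dict], merge_gap_pixels: int = 0) -> list[dict]: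
--     """按矩形包围盒距离合并过碎的小块。"""
--     if merge_gap_pixels <= 0 or len(regions) <= 1:
--         return [dict(region) for region in regions]
--
--     merged_regions = [dict(region) for region in regions]
--
--     changed = True
--     while changed:
--         changed = False
--         next_regions = []
--         consumed = [False] * len(merged_regions)
--
--         for index, region in enumerate(merged_regions):
--             if consumed[index]:
--                 continue
--
--             current = dict(region)
--             consumed[index] = True
--
--             merged_in_pass = True
--             while merged_in_pass:
--                 merged_in_pass = False
--                 for other_index, other in enumerate(merged_regions):
--                     if consumed[other_index]:
--                         continue
--                     if not _regions_within_gap(current, other, merge_gap_pixels):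
--                         continue
--
--                     current = {
--                         "min_x": min(current["min_x"], other["min_x"]),
--                         "min_y": min(current["min_y"], other["min_y"]),
--                         "max_x": max(current["max_x"], other["max_x"]),
--                         "max_y": max(current["max_y"], other["max_y"]),
--                         "pixel_count": current["pixel_count"] + other["pixel_count"],
--                     }
--                     consumed[other_index] = True
--                     merged_in_pass = True
--                     changed = True
--
--             next_regions.append(current)
--
--         merged_regions = next_regions
--
--     return merged_regions
--
-- def _regions_within_gap(region_a: dict, region_b: dict, merge_gap_pixels: int) -> bool:
--     """判断两个矩形在给定像素距离内是否应被合并。"""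
--     if region_a["max_x"] + merge_gap_pixels < region_b["min_x"]:
--         return False
--     if region_b["max_x"] + merge_gap_pixels < region_a["min_x"]:
--         return False
--     if region_a["max_y"] + merge_gap_pixels < region_b["min_y"]:
--         return False
--     if region_b["max_y"] + merge_gap_pixels < region_a["min_y"]:
--         return False
--     return True
-- ===== SOURCE B (Python) =====
-- def _finalize_regions(
--     region_bounds,
--     min_region_pixels,
--     padding_pixels,
--     merge_gap_pixels,
--     width,
--     height,
-- ):
--     ignored_small_regions = sum(
--         1 for region in region_bounds if region["pixel_count"] < min_region_pixels
--     )
--     regions = [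
--         {
--             "min_x": max(0, region["min_x"] - padding_pixels),
--             "min_y": max(0, region["min_y"] - padding_pixels),
--             "max_x": min(width - 1, region["max_x"] + padding_pixels),
--             "max_y": min(height - 1, region["max_y"] + padding_pixels),
--             "pixel_count": region["pixel_count"],
--         }
--         for region in region_bounds
--         if region["pixel_count"] >= min_region_pixels
--     ]
--     if merge_gap_pixels > 0:
--         regions = _merge_all(regions, merge_gap_pixels)
--     regions.sort(key=lambda region: (-region["max_y"], region["min_x"]))
--     return regions, ignored_small_regions
--
--
-- def _merge_all(regions, gap):
--     rs = list(regions)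
--     while True:
--         pair = _first_mergeable_pair(rs, gap)
--         if pair is None:
--             return rs
--         i, j = pair
--         a, b = rs[i], rs[j]
--         rs[i] = {
--             "min_x": min(a["min_x"], b["min_x"]),
--             "min_y": min(a["min_y"], b["min_y"]),
--             "max_x": max(a["max_x"], b["max_x"]),
--             "max_y": max(a["max_y"], b["max_y"]),
--             "pixel_count": a["pixel_count"] + b["pixel_count"],
--         }
--         del rs[j]
--
--
-- def _first_mergeable_pair(rs, gap):
--     for i in range(len(rs)):
--         for j in range(i + 1, len(rs)):
--             if _near(rs[i], rs[j], gap):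
--                 return (i, j)
--     return None
--
--
-- def _near(a, b, gap):
--     return (
--         b["min_x"] <= a["max_x"] + gap
--         and a["min_x"] <= b["max_x"] + gap
--         and b["min_y"] <= a["max_y"] + gap
--         and a["min_y"] <= b["max_y"] + gap
--     )
-- ===== Notes on version B (the rewrite author's own statement) =====
-- stated objective: simpler
-- what changed: B replaces A's multi-pass merging (three nested loops over a consumed-flag array: each pass seeds on the first unconsumed region and greedily absorbs others, repeated until a pass changes nothing) by a single fixpoint loop that repeatedly finds the first pair of rectangles within the gap and merges the later into the earlier slot; the filter/count prologue becomes comprehensions and the equivalence rests on the merge relation having a unique normal form.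
import Mathlib
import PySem

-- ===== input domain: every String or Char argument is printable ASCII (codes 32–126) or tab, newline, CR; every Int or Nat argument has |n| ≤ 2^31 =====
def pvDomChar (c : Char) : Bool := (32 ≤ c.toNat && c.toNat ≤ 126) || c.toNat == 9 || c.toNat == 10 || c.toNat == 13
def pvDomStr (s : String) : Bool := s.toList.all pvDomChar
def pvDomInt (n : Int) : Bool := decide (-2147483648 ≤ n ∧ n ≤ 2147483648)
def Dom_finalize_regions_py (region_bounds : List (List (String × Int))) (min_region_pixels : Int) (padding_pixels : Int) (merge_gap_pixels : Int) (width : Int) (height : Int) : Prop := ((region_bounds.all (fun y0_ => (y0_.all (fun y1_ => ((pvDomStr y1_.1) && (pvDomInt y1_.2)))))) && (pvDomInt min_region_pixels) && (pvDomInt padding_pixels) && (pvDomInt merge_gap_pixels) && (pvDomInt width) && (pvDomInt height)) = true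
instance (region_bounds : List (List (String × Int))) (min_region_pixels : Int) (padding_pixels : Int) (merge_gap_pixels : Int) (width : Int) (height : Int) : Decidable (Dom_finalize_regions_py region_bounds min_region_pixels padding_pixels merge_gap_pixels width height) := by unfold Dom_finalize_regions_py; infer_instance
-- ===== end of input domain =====

-- B replaces A's multi-pass seed/absorb merging (consumed flags, three nested loops) by a single
-- fixpoint loop that repeatedly merges the first pair of rectangles within the gap (simpler; not faster).
-- Both programs' fixed-shape 5-key region dicts are represented by the `Region` structure internally;
-- the association-list form is restored at the return.

-- ===== PORT A =====

structure Region where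
  minx : Int
  miny : Int
  maxx : Int
  maxy : Int
  cnt  : Int
deriving DecidableEq, Repr, Inhabited

-- the 5-key dict each program builds, in its Python insertion order
def Region.toDict (r : Region) : List (String × Int) :=
  [("min_x", r.minx), ("min_y", r.miny), ("max_x", r.maxx), ("max_y", r.maxy), ("pixel_count", r.cnt)]

-- region[k] for an input dict; total stand-in (default 0), exact under Pre_ (key present)
def readInt (region : List (String × Int)) (k : String) : Int :=
  (PySem.Dict.mk region).getD k 0

-- the merged dict both programs build: componentwise min/min/max/max, summed pixel_count
def Region.join (a b : Region) : Region :=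
  ⟨min a.minx b.minx, min a.miny b.miny, max a.maxx b.maxx, max a.maxy b.maxy, a.cnt + b.cnt⟩

-- _regions_within_gap, early-return chain as in A
def withinGap (a b : Region) (g : Int) : Bool :=
  if a.maxx + g < b.minx then false
  else if b.maxx + g < a.minx then false
  else if a.maxy + g < b.miny then false
  else if b.maxy + g < a.miny then false
  else true

-- A's inner `for other_index, other in enumerate(merged_regions)` absorption scan;
-- k counts the indices still to visit (k = len - oi at every call), so the recursion is structural
def scanOthers (mr : List Region) (g : Int) : Nat → Nat → Region → List Bool → Bool →
    Region × List Bool × Bool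
  | 0, _, current, consumed, merged => (current, consumed, merged)
  | k + 1, oi, current, consumed, merged =>
    if consumed.getD oi false then
      scanOthers mr g k (oi + 1) current consumed merged
    else if withinGap current mr[oi]! g then
      scanOthers mr g k (oi + 1) (current.join mr[oi]!) (consumed.set oi true) true
    else
      scanOthers mr g k (oi + 1) current consumed merged

-- A's `while merged_in_pass:` loop; each round consumes at least one region, so the fuel
-- `consumed.length + 1` supplied at the call site is never exhausted (proved below);
-- third component = whether any merge occurred (feeds `changed`)
def innerWhile (mr : List Region) (g : Int) : Nat → Region → List Bool →
    Region × List Bool × Bool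
  | 0, current, consumed => (current, consumed, false)
  | f + 1, current, consumed =>
    let s := scanOthers mr g mr.length 0 current consumed false
    if s.2.2 then
      let t := innerWhile mr g f s.1 s.2.1
      (t.1, t.2.1, true)
    else (s.1, s.2.1, false)

-- A's `for index, region in enumerate(merged_regions)` seed loop building next_regions
def passLoop (mr : List Region) (g : Int) : Nat → Nat → List Bool → List Region → Bool →
    List Region × Bool
  | 0, _, _, next, changed => (next, changed)
  | k + 1, idx, consumed, next, changed =>
    if consumed.getD idx false then
      passLoop mr g k (idx + 1) consumed next changed
    else
      let t := innerWhile mr g (consumed.length + 1) mr[idx]! (consumed.set idx true)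
      passLoop mr g k (idx + 1) t.2.1 (next ++ [t.1]) (changed || t.2.2)

-- A's outer `while changed:` loop; a changed pass strictly shrinks the list, so the fuel
-- `length + 1` supplied at the call site is never exhausted (proved below)
def outerLoop (g : Int) : Nat → List Region → List Region
  | 0, mr => mr
  | f + 1, mr =>
    let t := passLoop mr g mr.length 0 (List.replicate mr.length false) [] false
    if t.2 then outerLoop g f t.1 else t.1

-- merge_nearby_regions (dict copies are identities at the Region level)
def merge_nearby_regions (regions : List Region) (merge_gap_pixels : Int) : List Region :=
  if merge_gap_pixels ≤ 0 ∨ regions.length ≤ 1 then regions.map (fun r => r)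
  else outerLoop merge_gap_pixels (regions.length + 1) (regions.map (fun r => r))

def finalize_regions_py (region_bounds : List (List (String × Int))) (min_region_pixels : Int) (padding_pixels : Int) (merge_gap_pixels : Int) (width : Int) (height : Int) : (List (List (String × Int))) × Int :=
  let st := region_bounds.foldl (fun (acc : List Region × Int) region =>
    if readInt region "pixel_count" < min_region_pixels then (acc.1, acc.2 + 1)
    else (acc.1 ++ [⟨max 0 (readInt region "min_x" - padding_pixels),
                    max 0 (readInt region "min_y" - padding_pixels),
                    min (width - 1) (readInt region "max_x" + padding_pixels),
                    min (height - 1) (readInt region "max_y" + padding_pixels),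
                    readInt region "pixel_count"⟩], acc.2)) ([], 0)
  let merged := merge_nearby_regions st.1 merge_gap_pixels
  let sortedR := PySem.List.sorted2 merged (fun r => -r.maxy) (fun r => r.minx)
  (sortedR.map Region.toDict, st.2)

-- ===== PORT B =====

-- B's _near: one combined boolean expression
def nearB (a b : Region) (g : Int) : Bool :=
  decide (b.minx ≤ a.maxx + g) && decide (a.minx ≤ b.maxx + g) &&
  decide (b.miny ≤ a.maxy + g) && decide (a.miny ≤ b.maxy + g)

-- B's _first_mergeable_pair: nested index scan, first pair wins (structural countdowns)
def findInner (rs : List Region) (g : Int) (i : Nat) : Nat → Nat → Option Nat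
  | 0, _ => none
  | k + 1, j => if nearB rs[i]! rs[j]! g then some j else findInner rs g i k (j + 1)

def findOuter (rs : List Region) (g : Int) : Nat → Nat → Option (Nat × Nat)
  | 0, _ => none
  | k + 1, i =>
    match findInner rs g i (rs.length - (i + 1)) (i + 1) with
    | some j => some (i, j)
    | none => findOuter rs g k (i + 1)

def findPair (rs : List Region) (g : Int) : Option (Nat × Nat) :=
  findOuter rs g rs.length 0

-- B's _merge_all: repeatedly merge the first in-gap pair (later rectangle into the earlier
-- slot); each merge shortens the list, so the fuel `length + 1` is never exhausted
def mergeAll (g : Int) : Nat → List Region → List Region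
  | 0, rs => rs
  | f + 1, rs =>
    match findPair rs g with
    | none => rs
    | some (i, j) => mergeAll g f ((rs.set i ((rs[i]!).join (rs[j]!))).eraseIdx j)

def finalize_regions_py_alt (region_bounds : List (List (String × Int))) (min_region_pixels : Int) (padding_pixels : Int) (merge_gap_pixels : Int) (width : Int) (height : Int) : (List (List (String × Int))) × Int :=
  let ignored : Int := (region_bounds.countP (fun region => readInt region "pixel_count" < min_region_pixels) : Nat)
  let kept := region_bounds.filterMap (fun region =>
    if min_region_pixels ≤ readInt region "pixel_count" then
      some (⟨max 0 (readInt region "min_x" - padding_pixels),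
             max 0 (readInt region "min_y" - padding_pixels),
             min (width - 1) (readInt region "max_x" + padding_pixels),
             min (height - 1) (readInt region "max_y" + padding_pixels),
             readInt region "pixel_count"⟩ : Region)
    else none)
  let regions := if 0 < merge_gap_pixels then mergeAll merge_gap_pixels (kept.length + 1) kept else kept
  ((PySem.List.sorted2 regions (fun r => -r.maxy) (fun r => r.minx)).map Region.toDict, ignored)

-- ===== PRECONDITION & SPEC =====

-- Pre_ excludes exactly the inputs where Python A raises KeyError: a region without "pixel_count",
-- or a region that passes the pixel threshold but lacks one of the four coordinate keys.
def Pre_finalize_regions_py (region_bounds : List (List (String × Int))) (min_region_pixels : Int) (padding_pixels : Int) (merge_gap_pixels : Int) (width : Int) (height : Int) : Prop :=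
  ∀ region ∈ region_bounds,
    ((PySem.Dict.mk region).get? "pixel_count").isSome ∧
    (min_region_pixels ≤ (PySem.Dict.mk region).getD "pixel_count" 0 →
      ((PySem.Dict.mk region).get? "min_x").isSome ∧
      ((PySem.Dict.mk region).get? "min_y").isSome ∧
      ((PySem.Dict.mk region).get? "max_x").isSome ∧
      ((PySem.Dict.mk region).get? "max_y").isSome)

instance (region_bounds : List (List (String × Int))) (min_region_pixels : Int) (padding_pixels : Int) (merge_gap_pixels : Int) (width : Int) (height : Int) : Decidable (Pre_finalize_regions_py region_bounds min_region_pixels padding_pixels merge_gap_pixels width height) := by unfold Pre_finalize_regions_py; infer_instance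

def pvWitness_finalize_regions_py : (List (List (String × Int))) × Int × Int × Int × Int × Int :=
  ([[("min_x", 0), ("min_y", 0), ("max_x", 2), ("max_y", 2), ("pixel_count", 4)],
    [("min_x", 5), ("min_y", 1), ("max_x", 6), ("max_y", 2), ("pixel_count", 3)]], 1, 1, 2, 12, 12)

def Spec_finalize_regions_py (region_bounds : List (List (String × Int))) (min_region_pixels : Int) (padding_pixels : Int) (merge_gap_pixels : Int) (width : Int) (height : Int) (out : (List (List (String × Int))) × Int) : Prop := out = finalize_regions_py_alt region_bounds min_region_pixels padding_pixels merge_gap_pixels width height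
instance (region_bounds : List (List (String × Int))) (min_region_pixels : Int) (padding_pixels : Int) (merge_gap_pixels : Int) (width : Int) (height : Int) (out : (List (List (String × Int))) × Int) : Decidable (Spec_finalize_regions_py region_bounds min_region_pixels padding_pixels merge_gap_pixels width height out) := by unfold Spec_finalize_regions_py; infer_instance

-- ===== CLAIM (what is proved, stated in full; the proofs are below) =====
def Claim_equal_finalize_regions_py : Prop := ∀ (region_bounds : List (List (String × Int))) (min_region_pixels : Int) (padding_pixels : Int) (merge_gap_pixels : Int) (width : Int) (height : Int), Dom_finalize_regions_py region_bounds min_region_pixels padding_pixels merge_gap_pixels width height → Pre_finalize_regions_py region_bounds min_region_pixels padding_pixels merge_gap_pixels width height → Spec_finalize_regions_py region_bounds min_region_pixels padding_pixels merge_gap_pixels width height (finalize_regions_py region_bounds min_region_pixels padding_pixels merge_gap_pixels width height)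

-- ===== LEMMAS AND PROOFS =====

-- ## The abstract rewriting system: merge two in-gap rectangles, result kept at the earlier position

lemma withinGap_eq (a b : Region) (g : Int) :
    withinGap a b g = decide (b.minx ≤ a.maxx + g ∧ a.minx ≤ b.maxx + g ∧ b.miny ≤ a.maxy + g ∧ a.miny ≤ b.maxy + g) := by
  unfold withinGap
  split_ifs <;> (symm; simp) <;> omega

lemma nearB_eq (a b : Region) (g : Int) : nearB a b g = withinGap a b g := by
  rw [withinGap_eq]
  simp [nearB, Bool.decide_and, Bool.and_assoc]

lemma withinGap_comm (a b : Region) (g : Int) : withinGap a b g = withinGap b a g := by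
  rw [withinGap_eq, withinGap_eq]
  exact decide_eq_decide.mpr (by omega)

lemma withinGap_join_left (a b c : Region) (g : Int) (h : withinGap a c g = true) :
    withinGap (a.join b) c g = true := by
  rw [withinGap_eq] at *
  simp only [Region.join, decide_eq_true_eq] at *
  omega

lemma withinGap_join_right (a b c : Region) (g : Int) (h : withinGap b c g = true) :
    withinGap (a.join b) c g = true := by
  rw [withinGap_eq] at *
  simp only [Region.join, decide_eq_true_eq] at *
  omega

lemma join_comm (a b : Region) : a.join b = b.join a := by
  simp only [Region.join, Region.mk.injEq]
  omega

lemma join_assoc (a b c : Region) : (a.join b).join c = a.join (b.join c) := by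
  simp only [Region.join, Region.mk.injEq]
  omega

def doStep (l : List Region) (i j : Nat) : List Region :=
  (l.set i ((l[i]!).join (l[j]!))).eraseIdx j

def Step (g : Int) (l l' : List Region) : Prop :=
  ∃ i j, i < j ∧ j < l.length ∧ withinGap l[i]! l[j]! g = true ∧ l' = doStep l i j

def Steps (g : Int) : List Region → List Region → Prop := Relation.ReflTransGen (Step g)

def NF (g : Int) (l : List Region) : Prop :=
  ∀ i j, i < j → j < l.length → withinGap l[i]! l[j]! g = false

lemma length_doStep (l : List Region) (i j : Nat) (hj : j < l.length) :
    (doStep l i j).length + 1 = l.length := by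
  simp [doStep, List.length_eraseIdx, hj]
  omega

lemma step_length {g : Int} {l l' : List Region} (h : Step g l l') : l'.length + 1 = l.length := by
  obtain ⟨i, j, _, hj, _, rfl⟩ := h
  exact length_doStep l i j hj

lemma no_step_of_NF {g : Int} {l m : List Region} (h : NF g l) : ¬ Step g l m := by
  rintro ⟨i, j, h1, h2, h3, -⟩
  have := h i j h1 h2
  simp_all

lemma doStep_getElem? (l : List Region) (i j p : Nat) (hij : i < j) (hj : j < l.length) :
    (doStep l i j)[p]? =
      if p < j then (if p = i then some ((l[i]!).join (l[j]!)) else l[p]?) else l[p + 1]? := by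
  simp only [doStep, List.getElem?_eraseIdx, List.getElem?_set]
  by_cases h1 : p < j
  · simp only [if_pos h1]
    by_cases h2 : p = i
    · subst h2; rw [if_pos rfl, if_pos (by omega), if_pos rfl]
    · rw [if_neg (by omega), if_neg h2]
  · simp only [if_neg h1]
    rw [if_neg (by omega)]

lemma getElem_bang_eq (l : List Region) (p : Nat) (hp : p < l.length) : l[p]! = l[p] :=
  getElem!_pos l p hp

lemma getElem_bang_append_mid (q r : List Region) (y : Region) : (q ++ y :: r)[q.length]! = y := by
  simp

lemma eraseIdx_len_append (q r : List Region) (y : Region) :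
    (q ++ y :: r).eraseIdx q.length = q ++ r := by
  induction q with
  | nil => simp
  | cons a t ih => simp [List.eraseIdx_cons_succ, ih]

lemma set_len_append (q r : List Region) (y v : Region) :
    (q ++ y :: r).set q.length v = q ++ v :: r := by
  induction q with
  | nil => simp
  | cons a t ih => simp [ih]

lemma step_of_pattern (g : Int) (p q r : List Region) (x y : Region)
    (hg : withinGap x y g = true) :
    Step g (p ++ [x] ++ q ++ [y] ++ r) (p ++ [x.join y] ++ q ++ r) := by
  have hx : (p ++ [x] ++ q ++ [y] ++ r)[p.length]! = x := by
    have : p ++ [x] ++ q ++ [y] ++ r = p ++ x :: (q ++ y :: r) := by simp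
    rw [this, getElem_bang_append_mid]
  have hy : (p ++ [x] ++ q ++ [y] ++ r)[p.length + 1 + q.length]! = y := by
    have h2 : p ++ [x] ++ q ++ [y] ++ r = (p ++ x :: q) ++ y :: r := by simp
    have h3 : p.length + 1 + q.length = (p ++ x :: q).length := by simp; omega
    rw [h2, h3, getElem_bang_append_mid]
  refine ⟨p.length, p.length + 1 + q.length, by omega, by simp; omega, by rw [hx, hy]; exact hg, ?_⟩
  rw [doStep, hx, hy]
  have h4 : p ++ [x] ++ q ++ [y] ++ r = p ++ x :: (q ++ y :: r) := by simp
  rw [h4, set_len_append]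
  have h5 : p ++ x.join y :: (q ++ y :: r) = (p ++ x.join y :: q) ++ y :: r := by simp
  have h6 : p.length + 1 + q.length = (p ++ x.join y :: q).length := by simp; omega
  rw [h5, h6, eraseIdx_len_append]
  simp

lemma doStep_bang (l : List Region) (i j p : Nat) (hij : i < j) (hj : j < l.length)
    (hp : p + 1 < l.length) :
    (doStep l i j)[p]! = if p < j then (if p = i then (l[i]!).join (l[j]!) else l[p]!) else l[p + 1]! := by
  rw [List.getElem!_eq_getElem?_getD, doStep_getElem? l i j p hij hj]
  split_ifs <;> simp [List.getElem!_eq_getElem?_getD]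

-- Case A of the diamond: same earlier index, different later indices
lemma diamond_A (g : Int) (l : List Region) (i j j' : Nat) (hij : i < j) (hjj : j < j')
    (hj' : j' < l.length)
    (hg : withinGap l[i]! l[j]! g = true) (hg' : withinGap l[i]! l[j']! g = true) :
    ∃ k, Step g (doStep l i j) k ∧ Step g (doStep l i j') k := by
  have hn1 := length_doStep l i j (by omega)
  have hn2 := length_doStep l i j' hj'
  have hm1i : (doStep l i j)[i]! = (l[i]!).join (l[j]!) := by
    rw [doStep_bang l i j i hij (by omega) (by omega), if_pos (show i < j by omega), if_pos rfl]
  have hm1j : (doStep l i j)[j' - 1]! = l[j']! := by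
    rw [doStep_bang l i j (j' - 1) hij (by omega) (by omega), if_neg (by omega)]
    congr 1; omega
  have hm2i : (doStep l i j')[i]! = (l[i]!).join (l[j']!) := by
    rw [doStep_bang l i j' i (by omega) hj' (by omega), if_pos (show i < j' by omega), if_pos rfl]
  have hm2j : (doStep l i j')[j]! = l[j]! := by
    rw [doStep_bang l i j' j (by omega) hj' (by omega), if_pos (show j < j' by omega),
        if_neg (by omega)]
  refine ⟨doStep (doStep l i j) i (j' - 1),
          ⟨i, j' - 1, by omega, by omega, ?_, rfl⟩,
          ⟨i, j, hij, by omega, ?_, ?_⟩⟩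
  · rw [hm1i, hm1j]
    exact withinGap_join_left _ _ _ _ hg'
  · rw [hm2i, hm2j]
    exact withinGap_join_left _ _ _ _ hg
  · apply List.ext_getElem?
    intro p
    by_cases hpi : p = i
    · rw [doStep_getElem? (doStep l i j) i (j' - 1) p (by omega) (by omega),
          if_pos (show p < j' - 1 by omega), if_pos hpi,
          doStep_getElem? (doStep l i j') i j p hij (by omega),
          if_pos (show p < j by omega), if_pos hpi,
          hm1i, hm1j, hm2i, hm2j]
      rw [join_assoc, join_assoc, join_comm (l[j]!)]
    · by_cases hpj : p < j
      · rw [doStep_getElem? (doStep l i j) i (j' - 1) p (by omega) (by omega),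
            if_pos (show p < j' - 1 by omega), if_neg hpi,
            doStep_getElem? l i j p hij (by omega), if_pos hpj, if_neg hpi,
            doStep_getElem? (doStep l i j') i j p hij (by omega), if_pos hpj, if_neg hpi,
            doStep_getElem? l i j' p (by omega) hj',
            if_pos (show p < j' by omega), if_neg hpi]
      · by_cases hpj' : p < j' - 1
        · rw [doStep_getElem? (doStep l i j) i (j' - 1) p (by omega) (by omega),
              if_pos hpj', if_neg hpi,
              doStep_getElem? l i j p hij (by omega), if_neg hpj,
              doStep_getElem? (doStep l i j') i j p hij (by omega), if_neg hpj,
              doStep_getElem? l i j' (p + 1) (by omega) hj',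
              if_pos (show p + 1 < j' by omega), if_neg (by omega)]
        · rw [doStep_getElem? (doStep l i j) i (j' - 1) p (by omega) (by omega), if_neg hpj',
              doStep_getElem? l i j (p + 1) hij (by omega), if_neg (by omega),
              doStep_getElem? (doStep l i j') i j p hij (by omega), if_neg hpj,
              doStep_getElem? l i j' (p + 1) (by omega) hj', if_neg (by omega)]

-- Case B of the diamond: same later index, different earlier indices
lemma diamond_B (g : Int) (l : List Region) (i i' j : Nat) (hii : i < i') (hij : i' < j)
    (hj : j < l.length)
    (hg : withinGap l[i]! l[j]! g = true) (hg' : withinGap l[i']! l[j]! g = true) :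
    ∃ k, Step g (doStep l i j) k ∧ Step g (doStep l i' j) k := by
  have hn1 := length_doStep l i j hj
  have hn2 := length_doStep l i' j hj
  have hm1i : (doStep l i j)[i]! = (l[i]!).join (l[j]!) := by
    rw [doStep_bang l i j i (by omega) hj (by omega), if_pos (show i < j by omega), if_pos rfl]
  have hm1i' : (doStep l i j)[i']! = l[i']! := by
    rw [doStep_bang l i j i' (by omega) hj (by omega), if_pos (show i' < j by omega),
        if_neg (by omega)]
  have hm2i : (doStep l i' j)[i]! = l[i]! := by
    rw [doStep_bang l i' j i (by omega) hj (by omega), if_pos (show i < j by omega),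
        if_neg (by omega)]
  have hm2i' : (doStep l i' j)[i']! = (l[i']!).join (l[j]!) := by
    rw [doStep_bang l i' j i' (by omega) hj (by omega), if_pos (show i' < j by omega), if_pos rfl]
  refine ⟨doStep (doStep l i j) i i',
          ⟨i, i', by omega, by omega, ?_, rfl⟩,
          ⟨i, i', by omega, by omega, ?_, ?_⟩⟩
  · rw [hm1i, hm1i']
    apply withinGap_join_right
    rw [withinGap_comm]
    exact hg'
  · rw [hm2i, hm2i']
    rw [withinGap_comm]
    apply withinGap_join_right
    rw [withinGap_comm]
    exact hg
  · apply List.ext_getElem?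
    intro p
    by_cases hpi : p = i
    · rw [doStep_getElem? (doStep l i j) i i' p (by omega) (by omega),
          if_pos (show p < i' by omega), if_pos hpi,
          doStep_getElem? (doStep l i' j) i i' p (by omega) (by omega),
          if_pos (show p < i' by omega), if_pos hpi,
          hm1i, hm1i', hm2i, hm2i']
      rw [join_assoc, join_comm (l[j]!)]
    · by_cases hpi' : p < i'
      · rw [doStep_getElem? (doStep l i j) i i' p (by omega) (by omega),
            if_pos hpi', if_neg hpi,
            doStep_getElem? l i j p (by omega) hj, if_pos (show p < j by omega), if_neg hpi,
            doStep_getElem? (doStep l i' j) i i' p (by omega) (by omega),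
            if_pos hpi', if_neg hpi,
            doStep_getElem? l i' j p (by omega) hj, if_pos (show p < j by omega),
            if_neg (by omega)]
      · by_cases hpj : p + 1 < j
        · rw [doStep_getElem? (doStep l i j) i i' p (by omega) (by omega), if_neg hpi',
              doStep_getElem? l i j (p + 1) (by omega) hj, if_pos hpj, if_neg (by omega),
              doStep_getElem? (doStep l i' j) i i' p (by omega) (by omega), if_neg hpi',
              doStep_getElem? l i' j (p + 1) (by omega) hj, if_pos hpj, if_neg (by omega)]
        · rw [doStep_getElem? (doStep l i j) i i' p (by omega) (by omega), if_neg hpi',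
              doStep_getElem? l i j (p + 1) (by omega) hj, if_neg hpj,
              doStep_getElem? (doStep l i' j) i i' p (by omega) (by omega), if_neg hpi',
              doStep_getElem? l i' j (p + 1) (by omega) hj, if_neg hpj]

-- Case C of the diamond: the later index of one step is the earlier index of the other
lemma diamond_C (g : Int) (l : List Region) (i j j' : Nat) (hij : i < j) (hjj : j < j')
    (hj' : j' < l.length)
    (hg : withinGap l[i]! l[j]! g = true) (hg' : withinGap l[j]! l[j']! g = true) :
    ∃ k, Step g (doStep l i j) k ∧ Step g (doStep l j j') k := by
  have hn1 := length_doStep l i j (by omega)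
  have hn2 := length_doStep l j j' hj'
  have hm1i : (doStep l i j)[i]! = (l[i]!).join (l[j]!) := by
    rw [doStep_bang l i j i hij (by omega) (by omega), if_pos (show i < j by omega), if_pos rfl]
  have hm1j : (doStep l i j)[j' - 1]! = l[j']! := by
    rw [doStep_bang l i j (j' - 1) hij (by omega) (by omega), if_neg (by omega)]
    congr 1; omega
  have hm2i : (doStep l j j')[i]! = l[i]! := by
    rw [doStep_bang l j j' i (by omega) hj' (by omega), if_pos (show i < j' by omega),
        if_neg (by omega)]
  have hm2j : (doStep l j j')[j]! = (l[j]!).join (l[j']!) := by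
    rw [doStep_bang l j j' j (by omega) hj' (by omega), if_pos (show j < j' by omega), if_pos rfl]
  refine ⟨doStep (doStep l i j) i (j' - 1),
          ⟨i, j' - 1, by omega, by omega, ?_, rfl⟩,
          ⟨i, j, by omega, by omega, ?_, ?_⟩⟩
  · rw [hm1i, hm1j]
    exact withinGap_join_right _ _ _ _ hg'
  · rw [hm2i, hm2j]
    rw [withinGap_comm]
    apply withinGap_join_left
    rw [withinGap_comm]
    exact hg
  · apply List.ext_getElem?
    intro p
    by_cases hpi : p = i
    · rw [doStep_getElem? (doStep l i j) i (j' - 1) p (by omega) (by omega),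
          if_pos (show p < j' - 1 by omega), if_pos hpi,
          doStep_getElem? (doStep l j j') i j p (by omega) (by omega),
          if_pos (show p < j by omega), if_pos hpi,
          hm1i, hm1j, hm2i, hm2j]
      rw [join_assoc]
    · by_cases hpj : p < j
      · rw [doStep_getElem? (doStep l i j) i (j' - 1) p (by omega) (by omega),
            if_pos (show p < j' - 1 by omega), if_neg hpi,
            doStep_getElem? l i j p hij (by omega), if_pos hpj, if_neg hpi,
            doStep_getElem? (doStep l j j') i j p (by omega) (by omega),
            if_pos hpj, if_neg hpi,
            doStep_getElem? l j j' p (by omega) hj', if_pos (show p < j' by omega),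
            if_neg (by omega)]
      · by_cases hpj' : p < j' - 1
        · rw [doStep_getElem? (doStep l i j) i (j' - 1) p (by omega) (by omega),
              if_pos hpj', if_neg hpi,
              doStep_getElem? l i j p hij (by omega), if_neg hpj,
              doStep_getElem? (doStep l j j') i j p (by omega) (by omega), if_neg hpj,
              doStep_getElem? l j j' (p + 1) (by omega) hj',
              if_pos (show p + 1 < j' by omega), if_neg (by omega)]
        · rw [doStep_getElem? (doStep l i j) i (j' - 1) p (by omega) (by omega), if_neg hpj',
              doStep_getElem? l i j (p + 1) hij (by omega), if_neg (by omega),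
              doStep_getElem? (doStep l j j') i j p (by omega) (by omega), if_neg hpj,
              doStep_getElem? l j j' (p + 1) (by omega) hj', if_neg (by omega)]

-- Disjoint diamond, interleaving i < j < i' < j'
lemma diamond_D1 (g : Int) (l : List Region) (i j i' j' : Nat) (h1 : i < j) (h2 : j < i')
    (h3 : i' < j') (hj' : j' < l.length)
    (hg : withinGap l[i]! l[j]! g = true) (hg' : withinGap l[i']! l[j']! g = true) :
    ∃ k, Step g (doStep l i j) k ∧ Step g (doStep l i' j') k := by
  have hn1 := length_doStep l i j (by omega)
  have hn2 := length_doStep l i' j' hj'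
  have hm1i' : (doStep l i j)[i' - 1]! = l[i']! := by
    rw [doStep_bang l i j (i' - 1) h1 (by omega) (by omega), if_neg (by omega)]
    congr 1; omega
  have hm1j' : (doStep l i j)[j' - 1]! = l[j']! := by
    rw [doStep_bang l i j (j' - 1) h1 (by omega) (by omega), if_neg (by omega)]
    congr 1; omega
  have hm2i : (doStep l i' j')[i]! = l[i]! := by
    rw [doStep_bang l i' j' i h3 hj' (by omega), if_pos (show i < j' by omega), if_neg (by omega)]
  have hm2j : (doStep l i' j')[j]! = l[j]! := by
    rw [doStep_bang l i' j' j h3 hj' (by omega), if_pos (show j < j' by omega), if_neg (by omega)]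
  refine ⟨doStep (doStep l i j) (i' - 1) (j' - 1),
          ⟨i' - 1, j' - 1, by omega, by omega, ?_, rfl⟩,
          ⟨i, j, h1, by omega, ?_, ?_⟩⟩
  · rw [hm1i', hm1j']; exact hg'
  · rw [hm2i, hm2j]; exact hg
  · apply List.ext_getElem?
    intro p
    by_cases hpi : p = i
    · rw [doStep_getElem? (doStep l i j) (i' - 1) (j' - 1) p (by omega) (by omega),
          if_pos (show p < j' - 1 by omega), if_neg (by omega),
          doStep_getElem? l i j p h1 (by omega), if_pos (show p < j by omega), if_pos hpi,
          doStep_getElem? (doStep l i' j') i j p h1 (by omega),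
          if_pos (show p < j by omega), if_pos hpi, hm2i, hm2j]
    · by_cases hpi' : p = i' - 1
      · rw [doStep_getElem? (doStep l i j) (i' - 1) (j' - 1) p (by omega) (by omega),
            if_pos (show p < j' - 1 by omega), if_pos hpi', hm1i', hm1j',
            doStep_getElem? (doStep l i' j') i j p h1 (by omega), if_neg (by omega),
            doStep_getElem? l i' j' (p + 1) h3 hj',
            if_pos (show p + 1 < j' by omega), if_pos (by omega)]
      · by_cases hpj : p < j
        · rw [doStep_getElem? (doStep l i j) (i' - 1) (j' - 1) p (by omega) (by omega),
              if_pos (show p < j' - 1 by omega), if_neg hpi',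
              doStep_getElem? l i j p h1 (by omega), if_pos hpj, if_neg hpi,
              doStep_getElem? (doStep l i' j') i j p h1 (by omega), if_pos hpj, if_neg hpi,
              doStep_getElem? l i' j' p h3 hj', if_pos (show p < j' by omega),
              if_neg (by omega)]
        · by_cases hpj' : p < j' - 1
          · rw [doStep_getElem? (doStep l i j) (i' - 1) (j' - 1) p (by omega) (by omega),
                if_pos hpj', if_neg hpi',
                doStep_getElem? l i j p h1 (by omega), if_neg hpj,
                doStep_getElem? (doStep l i' j') i j p h1 (by omega), if_neg hpj,
                doStep_getElem? l i' j' (p + 1) h3 hj',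
                if_pos (show p + 1 < j' by omega), if_neg (by omega)]
          · rw [doStep_getElem? (doStep l i j) (i' - 1) (j' - 1) p (by omega) (by omega),
                if_neg hpj',
                doStep_getElem? l i j (p + 1) h1 (by omega), if_neg (by omega),
                doStep_getElem? (doStep l i' j') i j p h1 (by omega), if_neg hpj,
                doStep_getElem? l i' j' (p + 1) h3 hj', if_neg (by omega)]

-- Disjoint diamond, interleaving i < i' < j < j'
lemma diamond_D2 (g : Int) (l : List Region) (i j i' j' : Nat) (h1 : i < i') (h2 : i' < j)
    (h3 : j < j') (hj' : j' < l.length)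
    (hg : withinGap l[i]! l[j]! g = true) (hg' : withinGap l[i']! l[j']! g = true) :
    ∃ k, Step g (doStep l i j) k ∧ Step g (doStep l i' j') k := by
  have hn1 := length_doStep l i j (by omega)
  have hn2 := length_doStep l i' j' hj'
  have hm1i' : (doStep l i j)[i']! = l[i']! := by
    rw [doStep_bang l i j i' (by omega) (by omega) (by omega), if_pos (show i' < j by omega),
        if_neg (by omega)]
  have hm1j' : (doStep l i j)[j' - 1]! = l[j']! := by
    rw [doStep_bang l i j (j' - 1) (by omega) (by omega) (by omega), if_neg (by omega)]
    congr 1; omega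
  have hm2i : (doStep l i' j')[i]! = l[i]! := by
    rw [doStep_bang l i' j' i (by omega) hj' (by omega), if_pos (show i < j' by omega),
        if_neg (by omega)]
  have hm2j : (doStep l i' j')[j]! = l[j]! := by
    rw [doStep_bang l i' j' j (by omega) hj' (by omega), if_pos (show j < j' by omega),
        if_neg (by omega)]
  refine ⟨doStep (doStep l i j) i' (j' - 1),
          ⟨i', j' - 1, by omega, by omega, ?_, rfl⟩,
          ⟨i, j, by omega, by omega, ?_, ?_⟩⟩
  · rw [hm1i', hm1j']; exact hg'
  · rw [hm2i, hm2j]; exact hg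
  · apply List.ext_getElem?
    intro p
    by_cases hpi : p = i
    · rw [doStep_getElem? (doStep l i j) i' (j' - 1) p (by omega) (by omega),
          if_pos (show p < j' - 1 by omega), if_neg (by omega),
          doStep_getElem? l i j p (by omega) (by omega), if_pos (show p < j by omega),
          if_pos hpi,
          doStep_getElem? (doStep l i' j') i j p (by omega) (by omega),
          if_pos (show p < j by omega), if_pos hpi, hm2i, hm2j]
    · by_cases hpi' : p = i'
      · rw [doStep_getElem? (doStep l i j) i' (j' - 1) p (by omega) (by omega),
            if_pos (show p < j' - 1 by omega), if_pos hpi', hm1i', hm1j',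
            doStep_getElem? (doStep l i' j') i j p (by omega) (by omega),
            if_pos (show p < j by omega), if_neg (by omega),
            doStep_getElem? l i' j' p (by omega) hj',
            if_pos (show p < j' by omega), if_pos (by omega)]
      · by_cases hpj : p < j
        · rw [doStep_getElem? (doStep l i j) i' (j' - 1) p (by omega) (by omega),
              if_pos (show p < j' - 1 by omega), if_neg hpi',
              doStep_getElem? l i j p (by omega) (by omega), if_pos hpj, if_neg hpi,
              doStep_getElem? (doStep l i' j') i j p (by omega) (by omega),
              if_pos hpj, if_neg hpi,
              doStep_getElem? l i' j' p (by omega) hj', if_pos (show p < j' by omega),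
              if_neg hpi']
        · by_cases hpj' : p < j' - 1
          · rw [doStep_getElem? (doStep l i j) i' (j' - 1) p (by omega) (by omega),
                if_pos hpj', if_neg hpi',
                doStep_getElem? l i j p (by omega) (by omega), if_neg hpj,
                doStep_getElem? (doStep l i' j') i j p (by omega) (by omega), if_neg hpj,
                doStep_getElem? l i' j' (p + 1) (by omega) hj',
                if_pos (show p + 1 < j' by omega), if_neg (by omega)]
          · rw [doStep_getElem? (doStep l i j) i' (j' - 1) p (by omega) (by omega),
                if_neg hpj',
                doStep_getElem? l i j (p + 1) (by omega) (by omega), if_neg (by omega),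
                doStep_getElem? (doStep l i' j') i j p (by omega) (by omega), if_neg hpj,
                doStep_getElem? l i' j' (p + 1) (by omega) hj', if_neg (by omega)]

-- Disjoint diamond, interleaving i < i' < j' < j
lemma diamond_D3 (g : Int) (l : List Region) (i j i' j' : Nat) (h1 : i < i') (h2 : i' < j')
    (h3 : j' < j) (hj : j < l.length)
    (hg : withinGap l[i]! l[j]! g = true) (hg' : withinGap l[i']! l[j']! g = true) :
    ∃ k, Step g (doStep l i j) k ∧ Step g (doStep l i' j') k := by
  have hn1 := length_doStep l i j hj
  have hn2 := length_doStep l i' j' (by omega)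
  have hm1i' : (doStep l i j)[i']! = l[i']! := by
    rw [doStep_bang l i j i' (by omega) hj (by omega), if_pos (show i' < j by omega),
        if_neg (by omega)]
  have hm1j' : (doStep l i j)[j']! = l[j']! := by
    rw [doStep_bang l i j j' (by omega) hj (by omega), if_pos (show j' < j by omega),
        if_neg (by omega)]
  have hm2i : (doStep l i' j')[i]! = l[i]! := by
    rw [doStep_bang l i' j' i (by omega) (by omega) (by omega), if_pos (show i < j' by omega),
        if_neg (by omega)]
  have hm2j : (doStep l i' j')[j - 1]! = l[j]! := by
    rw [doStep_bang l i' j' (j - 1) (by omega) (by omega) (by omega), if_neg (by omega)]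
    congr 1; omega
  refine ⟨doStep (doStep l i j) i' j',
          ⟨i', j', by omega, by omega, ?_, rfl⟩,
          ⟨i, j - 1, by omega, by omega, ?_, ?_⟩⟩
  · rw [hm1i', hm1j']; exact hg'
  · rw [hm2i, hm2j]; exact hg
  · apply List.ext_getElem?
    intro p
    by_cases hpi : p = i
    · rw [doStep_getElem? (doStep l i j) i' j' p (by omega) (by omega),
          if_pos (show p < j' by omega), if_neg (by omega),
          doStep_getElem? l i j p (by omega) hj, if_pos (show p < j by omega), if_pos hpi,
          doStep_getElem? (doStep l i' j') i (j - 1) p (by omega) (by omega),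
          if_pos (show p < j - 1 by omega), if_pos hpi, hm2i, hm2j]
    · by_cases hpi' : p = i'
      · rw [doStep_getElem? (doStep l i j) i' j' p (by omega) (by omega),
            if_pos (show p < j' by omega), if_pos hpi', hm1i', hm1j',
            doStep_getElem? (doStep l i' j') i (j - 1) p (by omega) (by omega),
            if_pos (show p < j - 1 by omega), if_neg (by omega),
            doStep_getElem? l i' j' p (by omega) (by omega),
            if_pos (show p < j' by omega), if_pos (by omega)]
      · by_cases hpj' : p < j'
        · rw [doStep_getElem? (doStep l i j) i' j' p (by omega) (by omega),
              if_pos hpj', if_neg hpi',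
              doStep_getElem? l i j p (by omega) hj, if_pos (show p < j by omega), if_neg hpi,
              doStep_getElem? (doStep l i' j') i (j - 1) p (by omega) (by omega),
              if_pos (show p < j - 1 by omega), if_neg hpi,
              doStep_getElem? l i' j' p (by omega) (by omega),
              if_pos hpj', if_neg hpi']
        · by_cases hpj : p < j - 1
          · rw [doStep_getElem? (doStep l i j) i' j' p (by omega) (by omega), if_neg hpj',
                doStep_getElem? l i j (p + 1) (by omega) hj,
                if_pos (show p + 1 < j by omega), if_neg (by omega),
                doStep_getElem? (doStep l i' j') i (j - 1) p (by omega) (by omega),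
                if_pos hpj, if_neg hpi,
                doStep_getElem? l i' j' p (by omega) (by omega), if_neg (by omega)]
          · rw [doStep_getElem? (doStep l i j) i' j' p (by omega) (by omega), if_neg (by omega),
                doStep_getElem? l i j (p + 1) (by omega) hj, if_neg (by omega),
                doStep_getElem? (doStep l i' j') i (j - 1) p (by omega) (by omega), if_neg hpj,
                doStep_getElem? l i' j' (p + 1) (by omega) (by omega), if_neg (by omega)]

-- The local diamond: two different merge steps from the same list can be joined in one step
lemma diamond {g : Int} {l m1 m2 : List Region} (hs1 : Step g l m1) (hs2 : Step g l m2) :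
    m1 = m2 ∨ ∃ k, Step g m1 k ∧ Step g m2 k := by
  obtain ⟨i, j, hij, hj, hg, rfl⟩ := hs1
  obtain ⟨i', j', hij', hj', hg', rfl⟩ := hs2
  by_cases heq : i = i' ∧ j = j'
  · left; rw [heq.1, heq.2]
  · right
    rcases Nat.lt_trichotomy i i' with hii | hii | hii
    · -- i < i'
      rcases Nat.lt_trichotomy j i' with hji | hji | hji
      · exact diamond_D1 g l i j i' j' hij hji hij' hj' hg hg'
      · subst hji; exact diamond_C g l i j j' hij hij' hj' hg hg'
      · rcases Nat.lt_trichotomy j j' with hjj | hjj | hjj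
        · exact diamond_D2 g l i j i' j' hii hji hjj hj' hg hg'
        · subst hjj
          exact diamond_B g l i i' j hii hij' hj hg hg'
        · exact diamond_D3 g l i j i' j' hii hij' hjj hj hg hg'
    · -- i = i'
      subst hii
      rcases Nat.lt_trichotomy j j' with hjj | hjj | hjj
      · exact diamond_A g l i j j' hij hjj hj' hg hg'
      · exact absurd ⟨rfl, hjj⟩ heq
      · obtain ⟨k, s2, s1⟩ := diamond_A g l i j' j hij' hjj hj hg' hg
        exact ⟨k, s1, s2⟩
    · -- i' < i : symmetric
      have flip : ∃ k, Step g (doStep l i' j') k ∧ Step g (doStep l i j) k := by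
        rcases Nat.lt_trichotomy j' i with hji | hji | hji
        · exact diamond_D1 g l i' j' i j hij' hji hij hj hg' hg
        · subst hji; exact diamond_C g l i' j' j hij' hij hj hg' hg
        · rcases Nat.lt_trichotomy j' j with hjj | hjj | hjj
          · exact diamond_D2 g l i' j' i j hii hji hjj hj hg' hg
          · subst hjj
            exact diamond_B g l i' i j' hii hij hj' hg' hg
          · exact diamond_D3 g l i' j' i j hii hij hjj hj' hg' hg
      obtain ⟨k, s2, s1⟩ := flip
      exact ⟨k, s1, s2⟩

lemma exists_NF (g : Int) : ∀ (n : Nat) (l : List Region), l.length ≤ n →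
    ∃ m, Steps g l m ∧ NF g m := by
  intro n
  induction n with
  | zero =>
    intro l hl
    refine ⟨l, Relation.ReflTransGen.refl, fun i j h1 h2 => ?_⟩
    omega
  | succ n ih =>
    intro l hl
    by_cases hnf : NF g l
    · exact ⟨l, Relation.ReflTransGen.refl, hnf⟩
    · simp only [NF, not_forall] at hnf
      obtain ⟨i, j, h1, h2, h3⟩ := hnf
      have hg : withinGap l[i]! l[j]! g = true := by
        revert h3; cases withinGap l[i]! l[j]! g <;> simp
      have hlen := length_doStep l i j h2
      obtain ⟨m, sm, nfm⟩ := ih (doStep l i j) (by omega)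
      exact ⟨m, Relation.ReflTransGen.head ⟨i, j, h1, h2, hg, rfl⟩ sm, nfm⟩

lemma NF_unique (g : Int) : ∀ (n : Nat) (l n1 n2 : List Region), l.length ≤ n →
    Steps g l n1 → Steps g l n2 → NF g n1 → NF g n2 → n1 = n2 := by
  intro n
  induction n with
  | zero =>
    intro l n1 n2 hl s1 s2 hn1 hn2
    rcases Relation.ReflTransGen.cases_head s1 with rfl | ⟨m1, st1, -⟩
    · rcases Relation.ReflTransGen.cases_head s2 with rfl | ⟨m2, st2, -⟩
      · rfl
      · obtain ⟨i, j, h1, h2, -, -⟩ := st2; omega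
    · obtain ⟨i, j, h1, h2, -, -⟩ := st1; omega
  | succ n ih =>
    intro l n1 n2 hl s1 s2 hn1 hn2
    rcases Relation.ReflTransGen.cases_head s1 with rfl | ⟨m1, st1, s1'⟩
    · rcases Relation.ReflTransGen.cases_head s2 with rfl | ⟨m2, st2, -⟩
      · rfl
      · exact absurd st2 (no_step_of_NF hn1)
    · rcases Relation.ReflTransGen.cases_head s2 with rfl | ⟨m2, st2, s2'⟩
      · exact absurd st1 (no_step_of_NF hn2)
      · have hl1 := step_length st1
        have hl2 := step_length st2
        rcases diamond st1 st2 with rfl | ⟨k, sk1, sk2⟩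
        · exact ih m1 n1 n2 (by omega) s1' s2' hn1 hn2
        · have hk := step_length sk1
          obtain ⟨nk, sknk, nfk⟩ := exists_NF g k.length k le_rfl
          have e1 : n1 = nk :=
            ih m1 n1 nk (by omega) s1' (Relation.ReflTransGen.head sk1 sknk) hn1 nfk
          have e2 : n2 = nk :=
            ih m2 n2 nk (by omega) s2' (Relation.ReflTransGen.head sk2 sknk) hn2 nfk
          rw [e1, e2]

-- ## Simulation of A's merge loops by the rewriting system

-- the sublist of still-unconsumed regions, in index order
def sel (mr : List Region) (c : List Bool) : List Region :=
  ((List.range mr.length).filter (fun p => !(c.getD p false))).map (fun p => mr[p]!)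

lemma getD_set_self (c : List Bool) (p : Nat) (hp : p < c.length) :
    (c.set p true).getD p false = true := by
  rw [List.getD_eq_getElem?_getD, List.getElem?_set_self (by simpa using hp)]
  rfl

lemma getD_set_ne (c : List Bool) (p q : Nat) (h : q ≠ p) :
    (c.set p true).getD q false = c.getD q false := by
  rw [List.getD_eq_getElem?_getD, List.getElem?_set_ne (by omega), ← List.getD_eq_getElem?_getD]

lemma sel_split (mr : List Region) (c : List Bool) (p : Nat) (hlen : c.length = mr.length)
    (hp : p < mr.length) (hc : c.getD p false = false) :
    sel mr c = ((List.range p).filter (fun q => !(c.getD q false))).map (fun q => mr[q]!)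
        ++ [mr[p]!]
        ++ (((List.range (mr.length - (p + 1))).map (p + 1 + ·)).filter
              (fun q => !(c.getD q false))).map (fun q => mr[q]!) ∧
    sel mr (c.set p true)
      = ((List.range p).filter (fun q => !(c.getD q false))).map (fun q => mr[q]!)
        ++ (((List.range (mr.length - (p + 1))).map (p + 1 + ·)).filter
              (fun q => !(c.getD q false))).map (fun q => mr[q]!) := by
  have hsplit : List.range mr.length
      = (List.range p ++ [p]) ++ (List.range (mr.length - (p + 1))).map (p + 1 + ·) := by
    rw [← List.range_succ, ← List.range_add]
    congr 1; omega
  have e1 : (List.range p).filter (fun q => !((c.set p true).getD q false))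
      = (List.range p).filter (fun q => !(c.getD q false)) :=
    List.filter_congr (fun a ha => by
      rw [getD_set_ne c p a (by have := List.mem_range.mp ha; omega)])
  have e2 : ((List.range (mr.length - (p + 1))).map (p + 1 + ·)).filter
        (fun q => !((c.set p true).getD q false))
      = ((List.range (mr.length - (p + 1))).map (p + 1 + ·)).filter
        (fun q => !(c.getD q false)) :=
    List.filter_congr (fun a ha => by
      obtain ⟨t, -, rfl⟩ := List.mem_map.mp ha
      rw [getD_set_ne c p _ (by omega)])
  constructor
  · rw [sel, hsplit]
    simp only [List.filter_append, List.map_append, List.filter_singleton, hc]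
    simp
  · rw [sel, hsplit]
    simp only [List.filter_append, List.map_append, List.filter_singleton,
      getD_set_self c p (by omega), e1, e2]
    simp

lemma sel_all_consumed (mr : List Region) (c : List Bool)
    (h : ∀ q, q < mr.length → c.getD q false = true) : sel mr c = [] := by
  rw [sel, List.filter_eq_nil_iff.mpr, List.map_nil]
  intro a ha
  rw [h a (List.mem_range.mp ha)]
  simp

lemma sel_replicate (mr : List Region) : sel mr (List.replicate mr.length false) = mr := by
  rw [sel, List.filter_congr (q := fun _ => true) (fun a _ => by
    rw [List.getD_eq_getElem?_getD, List.getElem?_replicate]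
    split <;> rfl), List.filter_true]
  apply List.ext_getElem?
  intro q
  rw [List.getElem?_map]
  by_cases hq : q < mr.length
  · rw [List.getElem?_range hq, Option.map_some, getElem_bang_eq mr q hq,
        List.getElem?_eq_getElem hq]
  · rw [List.getElem?_eq_none (by simpa using hq), List.getElem?_eq_none (by omega),
        Option.map_none]

lemma scanOthers_length (mr : List Region) (g : Int) :
    ∀ (k oi : Nat) (cur : Region) (cons : List Bool) (m : Bool),
      (scanOthers mr g k oi cur cons m).2.1.length = cons.length := by
  intro k
  induction k with
  | zero => intro oi cur cons m; rfl
  | succ k ih =>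
    intro oi cur cons m
    simp only [scanOthers]
    split_ifs with h1 h2
    · exact ih (oi + 1) cur cons m
    · rw [ih]; simp
    · exact ih (oi + 1) cur cons m

lemma scanOthers_count (mr : List Region) (g : Int) :
    ∀ (k oi : Nat) (cur : Region) (cons : List Bool) (m : Bool),
      oi + k = mr.length → cons.length = mr.length →
      (scanOthers mr g k oi cur cons m).2.1.count false ≤ cons.count false ∧
        (m = false → (scanOthers mr g k oi cur cons m).2.2 = true →
          (scanOthers mr g k oi cur cons m).2.1.count false < cons.count false) := by
  intro k
  induction k with
  | zero =>
    intro oi cur cons m hk hlen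
    exact ⟨le_refl _, fun hm hf => by simp [scanOthers] at hf; rw [hf] at hm; simp at hm⟩
  | succ k ih =>
    intro oi cur cons m hk hlen
    simp only [scanOthers]
    split_ifs with h1 h2
    · exact ih (oi + 1) cur cons m (by omega) hlen
    · have hlt : oi < cons.length := by omega
      have hgd : cons.getD oi false = cons[oi] := by
        rw [List.getD_eq_getElem?_getD, List.getElem?_eq_getElem hlt]; rfl
      have hfalse : cons[oi] = false := by rw [hgd] at h1; simpa using h1
      have hpos : 1 ≤ List.count false cons :=
        List.count_pos_iff.mpr (hfalse ▸ List.getElem_mem hlt)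
      have hcount : List.count false (cons.set oi true) = List.count false cons - 1 := by
        rw [List.count_set hlt]; simp [hfalse]
      have ih' := ih (oi + 1) (cur.join mr[oi]!) (cons.set oi true) true (by omega)
        (by simpa using hlen)
      exact ⟨by omega, fun _ _ => by omega⟩
    · exact ih (oi + 1) cur cons m (by omega) hlen

lemma scan_consumed_mono (mr : List Region) (g : Int) :
    ∀ (k oi : Nat) (cur : Region) (cons : List Bool) (m : Bool),
      oi + k = mr.length → cons.length = mr.length →
      ∀ q, cons.getD q false = true →
      (scanOthers mr g k oi cur cons m).2.1.getD q false = true := by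
  intro k
  induction k with
  | zero => intro oi cur cons m hk hlen q hq; exact hq
  | succ k ih =>
    intro oi cur cons m hk hlen q hq
    simp only [scanOthers]
    split_ifs with h1 h2
    · exact ih (oi + 1) cur cons m (by omega) hlen q hq
    · refine ih (oi + 1) _ _ true (by omega) (by simpa using hlen) q ?_
      by_cases hqo : q = oi
      · subst hqo; exact getD_set_self cons q (by omega)
      · rw [getD_set_ne cons oi q hqo]; exact hq
    · exact ih (oi + 1) cur cons m (by omega) hlen q hq

lemma scan_flag_mono (mr : List Region) (g : Int) :
    ∀ (k oi : Nat) (cur : Region) (cons : List Bool) (m : Bool), m = true →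
      (scanOthers mr g k oi cur cons m).2.2 = true := by
  intro k
  induction k with
  | zero => intro oi cur cons m hm; exact hm
  | succ k ih =>
    intro oi cur cons m hm
    simp only [scanOthers]
    split_ifs with h1 h2
    · exact ih (oi + 1) cur cons m hm
    · exact ih (oi + 1) _ _ true rfl
    · exact ih (oi + 1) cur cons m hm

lemma scan_sim (mr : List Region) (g : Int) :
    ∀ (k oi : Nat) (cur : Region) (cons : List Bool) (m : Bool),
      oi + k = mr.length → cons.length = mr.length →
      ∀ next : List Region,
        Steps g (next ++ [cur] ++ sel mr cons)
          (next ++ [(scanOthers mr g k oi cur cons m).1]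
            ++ sel mr (scanOthers mr g k oi cur cons m).2.1) := by
  intro k
  induction k with
  | zero => intro oi cur cons m hk hlen next; exact Relation.ReflTransGen.refl
  | succ k ih =>
    intro oi cur cons m hk hlen next
    simp only [scanOthers]
    split_ifs with h1 h2
    · exact ih (oi + 1) cur cons m (by omega) hlen next
    · obtain ⟨e1, e2⟩ := sel_split mr cons oi hlen (by omega) (by simpa using h1)
      refine Relation.ReflTransGen.head ?_
        (ih (oi + 1) _ _ true (by omega) (by simpa using hlen) next)
      rw [e1, e2]
      have hstep := step_of_pattern g next
        (((List.range oi).filter (fun q => !(cons.getD q false))).map (fun q => mr[q]!))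
        ((((List.range (mr.length - (oi + 1))).map (oi + 1 + ·)).filter
            (fun q => !(cons.getD q false))).map (fun q => mr[q]!))
        cur (mr[oi]!) h2
      simpa [List.append_assoc] using hstep
    · exact ih (oi + 1) cur cons m (by omega) hlen next

lemma scan_nomerge (mr : List Region) (g : Int) :
    ∀ (k oi : Nat) (cur : Region) (cons : List Bool) (m : Bool), oi + k = mr.length →
      (scanOthers mr g k oi cur cons m).2.2 = false →
      m = false ∧ (scanOthers mr g k oi cur cons m).1 = cur ∧
      (scanOthers mr g k oi cur cons m).2.1 = cons ∧
      (∀ p, oi ≤ p → p < mr.length → cons.getD p false = false →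
        withinGap cur mr[p]! g = false) := by
  intro k
  induction k with
  | zero =>
    intro oi cur cons m hk hflag
    exact ⟨hflag, rfl, rfl, fun p hp1 hp2 _ => absurd hp2 (by omega)⟩
  | succ k ih =>
    intro oi cur cons m hk hflag
    simp only [scanOthers] at hflag ⊢
    split_ifs with h1 h2
    · rw [if_pos h1] at hflag
      obtain ⟨ih1, ih2, ih3, ih4⟩ := ih (oi + 1) cur cons m (by omega) hflag
      refine ⟨ih1, ih2, ih3, fun p hp1 hp2 hp3 => ?_⟩
      by_cases hpo : p = oi
      · subst hpo; rw [hp3] at h1; simp at h1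
      · exact ih4 p (by omega) hp2 hp3
    · rw [if_neg h1, if_pos h2] at hflag
      rw [scan_flag_mono mr g k (oi + 1) _ _ true rfl] at hflag
      simp at hflag
    · rw [if_neg h1, if_neg h2] at hflag
      obtain ⟨ih1, ih2, ih3, ih4⟩ := ih (oi + 1) cur cons m (by omega) hflag
      refine ⟨ih1, ih2, ih3, fun p hp1 hp2 hp3 => ?_⟩
      by_cases hpo : p = oi
      · subst hpo
        revert h2; cases withinGap cur mr[p]! g <;> simp
      · exact ih4 p (by omega) hp2 hp3

lemma innerWhile_length (mr : List Region) (g : Int) :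
    ∀ (f : Nat) (cur : Region) (cons : List Bool),
      (innerWhile mr g f cur cons).2.1.length = cons.length := by
  intro f
  induction f with
  | zero => intro cur cons; rfl
  | succ f ih =>
    intro cur cons
    simp only [innerWhile]
    split_ifs with hm
    · rw [ih, scanOthers_length]
    · rw [scanOthers_length]

lemma innerWhile_count (mr : List Region) (g : Int) :
    ∀ (f : Nat) (cur : Region) (cons : List Bool), cons.length = mr.length →
      (innerWhile mr g f cur cons).2.1.count false ≤ cons.count false ∧
        ((innerWhile mr g f cur cons).2.2 = true →
          (innerWhile mr g f cur cons).2.1.count false < cons.count false) := by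
  intro f
  induction f with
  | zero => intro cur cons hlen; exact ⟨le_refl _, fun h => by simp [innerWhile] at h⟩
  | succ f ih =>
    intro cur cons hlen
    simp only [innerWhile]
    split_ifs with hm
    · dsimp only
      have hs := scanOthers_count mr g mr.length 0 cur cons false (by omega) hlen
      have hstrict := hs.2 rfl hm
      have ih' := ih (scanOthers mr g mr.length 0 cur cons false).1
        (scanOthers mr g mr.length 0 cur cons false).2.1
        (by rw [scanOthers_length]; exact hlen)
      exact ⟨by omega, fun _ => by omega⟩
    · have hs := scanOthers_count mr g mr.length 0 cur cons false (by omega) hlen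
      exact ⟨hs.1, by simp⟩

lemma innerWhile_sim (mr : List Region) (g : Int) :
    ∀ (f : Nat) (cur : Region) (cons : List Bool), cons.length = mr.length →
      ∀ next : List Region,
        Steps g (next ++ [cur] ++ sel mr cons)
          (next ++ [(innerWhile mr g f cur cons).1]
            ++ sel mr (innerWhile mr g f cur cons).2.1) := by
  intro f
  induction f with
  | zero => intro cur cons hlen next; exact Relation.ReflTransGen.refl
  | succ f ih =>
    intro cur cons hlen next
    simp only [innerWhile]
    split_ifs with hm
    · refine Relation.ReflTransGen.trans
        (scan_sim mr g mr.length 0 cur cons false (by omega) hlen next) ?_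
      exact ih _ _ (by rw [scanOthers_length]; exact hlen) next
    · exact scan_sim mr g mr.length 0 cur cons false (by omega) hlen next

lemma innerWhile_consumed_mono (mr : List Region) (g : Int) :
    ∀ (f : Nat) (cur : Region) (cons : List Bool), cons.length = mr.length →
      ∀ q, cons.getD q false = true →
      (innerWhile mr g f cur cons).2.1.getD q false = true := by
  intro f
  induction f with
  | zero => intro cur cons hlen q hq; exact hq
  | succ f ih =>
    intro cur cons hlen q hq
    simp only [innerWhile]
    split_ifs with hm
    · exact ih _ _ (by rw [scanOthers_length]; exact hlen)
        q (scan_consumed_mono mr g mr.length 0 cur cons false (by omega) hlen q hq)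
    · exact scan_consumed_mono mr g mr.length 0 cur cons false (by omega) hlen q hq

lemma innerWhile_nomerge (mr : List Region) (g : Int) :
    ∀ (f : Nat) (cur : Region) (cons : List Bool), cons.count false < f →
      (innerWhile mr g f cur cons).2.2 = false →
      (innerWhile mr g f cur cons).1 = cur ∧ (innerWhile mr g f cur cons).2.1 = cons ∧
      (∀ p, p < mr.length → cons.getD p false = false → withinGap cur mr[p]! g = false) := by
  intro f
  induction f with
  | zero => intro cur cons hf; omega
  | succ f ih =>
    intro cur cons hf hflag
    simp only [innerWhile] at hflag ⊢
    split_ifs with hm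
    · rw [if_pos hm] at hflag; simp at hflag
    · rw [if_neg hm] at hflag
      have hsf : (scanOthers mr g mr.length 0 cur cons false).2.2 = false := by
        revert hm; cases (scanOthers mr g mr.length 0 cur cons false).2.2 <;> simp
      obtain ⟨-, h1, h2, h3⟩ := scan_nomerge mr g mr.length 0 cur cons false (by omega) hsf
      exact ⟨h1, h2, fun p hp2 hp3 => h3 p (by omega) hp2 hp3⟩

lemma passLoop_len (mr : List Region) (g : Int) :
    ∀ (k idx : Nat) (cons : List Bool) (next : List Region) (ch : Bool),
      idx + k = mr.length → cons.length = mr.length →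
      (passLoop mr g k idx cons next ch).1.length ≤ next.length + cons.count false ∧
        ((passLoop mr g k idx cons next ch).2 = true → ch = true ∨
          (passLoop mr g k idx cons next ch).1.length < next.length + cons.count false) := by
  intro k
  induction k with
  | zero =>
    intro idx cons next ch hk hlen
    exact ⟨by simp [passLoop], fun hch => Or.inl (by simpa [passLoop] using hch)⟩
  | succ k ih =>
    intro idx cons next ch hk hlen
    simp only [passLoop]
    split_ifs with hc
    · exact ih (idx + 1) cons next ch (by omega) hlen
    · have hlt : idx < cons.length := by omega
      have hgd : cons.getD idx false = cons[idx] := by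
        rw [List.getD_eq_getElem?_getD, List.getElem?_eq_getElem hlt]; rfl
      have hfalse : cons[idx] = false := by rw [hgd] at hc; simpa using hc
      have hpos : 1 ≤ List.count false cons :=
        List.count_pos_iff.mpr (hfalse ▸ List.getElem_mem hlt)
      have hcount : List.count false (cons.set idx true) = List.count false cons - 1 := by
        rw [List.count_set hlt]; simp [hfalse]
      have hiw := innerWhile_count mr g (cons.length + 1) mr[idx]! (cons.set idx true)
        (by simpa using hlen)
      have hiwlen : (innerWhile mr g (cons.length + 1) mr[idx]!
          (cons.set idx true)).2.1.length = cons.length := by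
        rw [innerWhile_length]; simp
      obtain ⟨ih1, ih2⟩ := ih (idx + 1) _ (next ++
          [(innerWhile mr g (cons.length + 1) mr[idx]! (cons.set idx true)).1])
        (ch || (innerWhile mr g (cons.length + 1) mr[idx]! (cons.set idx true)).2.2)
        (by omega) (by rw [hiwlen]; exact hlen)
      constructor
      · simp only [List.length_append, List.length_singleton] at ih1 ⊢
        omega
      · intro hch
        rcases ih2 hch with h1 | h2
        · rcases Bool.or_eq_true_iff.mp h1 with hc1 | hc2
          · exact Or.inl hc1
          · right
            have := hiw.2 hc2
            simp only [List.length_append, List.length_singleton] at ih1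
            omega
        · right
          simp only [List.length_append, List.length_singleton] at h2
          omega

lemma passLoop_shrink (mr : List Region) (g : Int)
    (h : (passLoop mr g mr.length 0 (List.replicate mr.length false) [] false).2 = true) :
    (passLoop mr g mr.length 0 (List.replicate mr.length false) [] false).1.length
      < mr.length := by
  have := passLoop_len mr g mr.length 0 (List.replicate mr.length false) [] false
    (by omega) (by simp)
  rcases this.2 h with h1 | h2
  · simp at h1
  · simpa [List.count_replicate] using h2

lemma pass_flag_mono (mr : List Region) (g : Int) :
    ∀ (k idx : Nat) (cons : List Bool) (next : List Region) (ch : Bool), ch = true →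
      (passLoop mr g k idx cons next ch).2 = true := by
  intro k
  induction k with
  | zero => intro idx cons next ch hch; exact hch
  | succ k ih =>
    intro idx cons next ch hch
    simp only [passLoop]
    split_ifs with hc
    · exact ih (idx + 1) cons next ch hch
    · exact ih (idx + 1) _ _ _ (by rw [hch]; rfl)

lemma pass_sim (mr : List Region) (g : Int) :
    ∀ (k idx : Nat) (cons : List Bool) (next : List Region) (ch : Bool),
      idx + k = mr.length → cons.length = mr.length →
      (∀ q, q < idx → cons.getD q false = true) →
      Steps g (next ++ sel mr cons) (passLoop mr g k idx cons next ch).1 := by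
  intro k
  induction k with
  | zero =>
    intro idx cons next ch hk hlen hinv
    rw [sel_all_consumed mr cons fun q hq => hinv q (by omega), List.append_nil]
    exact Relation.ReflTransGen.refl
  | succ k ih =>
    intro idx cons next ch hk hlen hinv
    simp only [passLoop]
    split_ifs with hc
    · refine ih (idx + 1) cons next ch (by omega) hlen fun q hq => ?_
      by_cases hqi : q = idx
      · subst hqi; simpa using hc
      · exact hinv q (by omega)
    · have hu : (List.range idx).filter (fun q => !(cons.getD q false)) = [] := by
        rw [List.filter_eq_nil_iff]
        intro a ha
        rw [hinv a (List.mem_range.mp ha)]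
        simp
      obtain ⟨e1, e2⟩ := sel_split mr cons idx hlen (by omega) (by simpa using hc)
      rw [hu] at e1 e2
      simp only [List.map_nil, List.nil_append] at e1 e2
      have hiw := innerWhile_sim mr g (cons.length + 1) mr[idx]! (cons.set idx true)
        (by simpa using hlen) next
      rw [e2] at hiw
      have hinv' : ∀ q, q < idx + 1 →
          (innerWhile mr g (cons.length + 1) mr[idx]!
            (cons.set idx true)).2.1.getD q false = true := by
        intro q hq
        apply innerWhile_consumed_mono mr g _ _ _ (by simpa using hlen)
        by_cases hqi : q = idx
        · subst hqi; exact getD_set_self cons q (by omega)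
        · rw [getD_set_ne cons idx q hqi]; exact hinv q (by omega)
      refine Relation.ReflTransGen.trans ?_
        (ih (idx + 1) _ _ _ (by omega)
          (by rw [innerWhile_length]; simpa using hlen) hinv')
      rw [e1]
      simpa [List.append_assoc] using hiw

lemma pass_false (mr : List Region) (g : Int) :
    ∀ (k idx : Nat) (cons : List Bool) (next : List Region) (ch : Bool),
      idx + k = mr.length → cons.length = mr.length →
      (∀ q, q < mr.length → (cons.getD q false = true ↔ q < idx)) →
      (passLoop mr g k idx cons next ch).2 = false →
      (passLoop mr g k idx cons next ch).1 = next ++ mr.drop idx ∧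
      (∀ a b, idx ≤ a → a < b → b < mr.length → withinGap mr[a]! mr[b]! g = false) := by
  intro k
  induction k with
  | zero =>
    intro idx cons next ch hk hlen hpat hflag
    refine ⟨by rw [List.drop_eq_nil_of_le (by omega), List.append_nil]; rfl, ?_⟩
    intro a b ha hab hb
    omega
  | succ k ih =>
    intro idx cons next ch hk hlen hpat hflag
    simp only [passLoop] at hflag ⊢
    split_ifs with hc
    · rw [if_pos hc] at hflag
      exact absurd ((hpat idx (by omega)).mp (by simpa using hc)) (by omega)
    · rw [if_neg hc] at hflag
      have hchm : (ch || (innerWhile mr g (cons.length + 1) mr[idx]!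
          (cons.set idx true)).2.2) = false := by
        by_contra hcontra
        rw [pass_flag_mono mr g k (idx + 1) _ _ _
          (by revert hcontra; cases (ch || (innerWhile mr g (cons.length + 1) mr[idx]!
            (cons.set idx true)).2.2) <;> simp)] at hflag
        simp at hflag
      have htf : (innerWhile mr g (cons.length + 1) mr[idx]!
          (cons.set idx true)).2.2 = false := by
        revert hchm
        cases (innerWhile mr g (cons.length + 1) mr[idx]! (cons.set idx true)).2.2 <;> simp
      obtain ⟨ht1, ht2, ht3⟩ := innerWhile_nomerge mr g (cons.length + 1) mr[idx]!
        (cons.set idx true) (by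
          have hcl : (cons.set idx true).count false ≤ (cons.set idx true).length :=
            List.count_le_length
          simp at hcl
          omega) htf
      have hpat' : ∀ q, q < mr.length →
          ((innerWhile mr g (cons.length + 1) mr[idx]!
            (cons.set idx true)).2.1.getD q false = true ↔ q < idx + 1) := by
        intro q hq
        rw [ht2]
        by_cases hqi : q = idx
        · subst hqi
          simp only [getD_set_self cons q (by omega)]
          simp only [true_iff]
          omega
        · rw [getD_set_ne cons idx q hqi, hpat q hq]
          omega
      obtain ⟨ih1, ih2⟩ := ih (idx + 1) _ _ _ (by omega)
        (by rw [innerWhile_length]; simpa using hlen) hpat' hflag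
      constructor
      · rw [ih1, ht1, List.drop_eq_getElem_cons (show idx < mr.length by omega),
          ← getElem_bang_eq mr idx (by omega)]
        simp
      · intro a b ha hab hb
        by_cases hai : a = idx
        · rw [hai]
          apply ht3 b hb
          rw [getD_set_ne cons idx b (by omega)]
          have := hpat b hb
          revert this
          cases cons.getD b false <;> simp <;> omega
        · exact ih2 a b (by omega) hab hb

lemma outer_sim (g : Int) :
    ∀ (f : Nat) (mr : List Region), mr.length < f →
      Steps g mr (outerLoop g f mr) ∧ NF g (outerLoop g f mr) := by
  intro f
  induction f with
  | zero => intro mr hf; omega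
  | succ f ih =>
    intro mr hf
    simp only [outerLoop]
    split_ifs with ht
    · have hsim := pass_sim mr g mr.length 0 (List.replicate mr.length false) [] false
        (by omega) (by simp) (fun q hq => absurd hq (by omega))
      rw [List.nil_append, sel_replicate] at hsim
      have hshrink := passLoop_shrink mr g ht
      obtain ⟨ihs, ihn⟩ := ih
        (passLoop mr g mr.length 0 (List.replicate mr.length false) [] false).1 (by omega)
      exact ⟨Relation.ReflTransGen.trans hsim ihs, ihn⟩
    · have hpat : ∀ q, q < mr.length →
          ((List.replicate mr.length false).getD q false = true ↔ q < 0) := by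
        intro q hq
        rw [List.getD_eq_getElem?_getD, List.getElem?_replicate, if_pos hq]
        simp
      have hres := pass_false mr g mr.length 0 (List.replicate mr.length false) [] false
        (by omega) (by simp) hpat
        (by revert ht; cases (passLoop mr g mr.length 0
          (List.replicate mr.length false) [] false).2 <;> simp)
      obtain ⟨h1, h2⟩ := hres
      rw [h1, List.drop_zero, List.nil_append]
      exact ⟨Relation.ReflTransGen.refl, fun a b hab hb => h2 a b (by omega) hab hb⟩

-- ## Simulation of B's merge loop

lemma findInner_some (rs : List Region) (g : Int) (i : Nat) :
    ∀ (kj j j' : Nat), findInner rs g i kj j = some j' →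
      j ≤ j' ∧ j' < j + kj ∧ nearB rs[i]! rs[j']! g = true := by
  intro kj
  induction kj with
  | zero => intro j j' h; simp [findInner] at h
  | succ kj ih =>
    intro j j' h
    simp only [findInner] at h
    by_cases hn : nearB rs[i]! rs[j]! g = true
    · rw [if_pos hn] at h
      obtain rfl : j = j' := by simpa using h
      exact ⟨le_refl _, by omega, hn⟩
    · rw [if_neg hn] at h
      obtain ⟨h1, h2, h3⟩ := ih (j + 1) j' h
      exact ⟨by omega, by omega, h3⟩

lemma findInner_none (rs : List Region) (g : Int) (i : Nat) :
    ∀ (kj j : Nat), findInner rs g i kj j = none →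
      ∀ q, j ≤ q → q < j + kj → nearB rs[i]! rs[q]! g = false := by
  intro kj
  induction kj with
  | zero => intro j h q hq1 hq2; omega
  | succ kj ih =>
    intro j h q hq1 hq2
    simp only [findInner] at h
    by_cases hn : nearB rs[i]! rs[j]! g = true
    · rw [if_pos hn] at h; cases h
    · rw [if_neg hn] at h
      by_cases hqj : q = j
      · subst hqj; revert hn; cases nearB rs[i]! rs[q]! g <;> simp
      · exact ih (j + 1) h q (by omega) (by omega)

lemma findOuter_some (rs : List Region) (g : Int) :
    ∀ (k i : Nat) (p : Nat × Nat), findOuter rs g k i = some p →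
      p.1 < p.2 ∧ p.2 < rs.length ∧ nearB rs[p.1]! rs[p.2]! g = true := by
  intro k
  induction k with
  | zero => intro i p h; simp [findOuter] at h
  | succ k ih =>
    intro i p h
    simp only [findOuter] at h
    rcases hfi : findInner rs g i (rs.length - (i + 1)) (i + 1) with - | j
    · rw [hfi] at h
      exact ih (i + 1) p h
    · rw [hfi] at h
      obtain rfl : (i, j) = p := by simpa using h
      obtain ⟨h1, h2, h3⟩ := findInner_some rs g i _ (i + 1) j hfi
      exact ⟨by omega, by omega, h3⟩

lemma findOuter_none (rs : List Region) (g : Int) :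
    ∀ (k i : Nat), findOuter rs g k i = none →
      ∀ a b, i ≤ a → a < i + k → a < b → b < rs.length → nearB rs[a]! rs[b]! g = false := by
  intro k
  induction k with
  | zero => intro i h a b h1 h2 h3 h4; omega
  | succ k ih =>
    intro i h a b h1 h2 h3 h4
    simp only [findOuter] at h
    rcases hfi : findInner rs g i (rs.length - (i + 1)) (i + 1) with - | j
    · rw [hfi] at h
      by_cases hai : a = i
      · subst hai
        exact findInner_none rs g a _ (a + 1) hfi b (by omega) (by omega)
      · exact ih (i + 1) h a b (by omega) (by omega) h3 h4
    · rw [hfi] at h; simp at h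

lemma mergeAll_sim (g : Int) :
    ∀ (f : Nat) (rs : List Region), rs.length < f →
      Steps g rs (mergeAll g f rs) ∧ NF g (mergeAll g f rs) := by
  intro f
  induction f with
  | zero => intro rs hf; omega
  | succ f ih =>
    intro rs hf
    rcases hp : findPair rs g with - | ⟨i, j⟩
    · simp only [mergeAll, hp]
      refine ⟨Relation.ReflTransGen.refl, fun a b hab hb => ?_⟩
      rw [← nearB_eq]
      exact findOuter_none rs g rs.length 0 hp a b (by omega) (by omega) hab hb
    · have heq : mergeAll g (f + 1) rs
          = mergeAll g f ((rs.set i ((rs[i]!).join (rs[j]!))).eraseIdx j) := by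
        simp only [mergeAll, hp]
      rw [heq]
      obtain ⟨h1, h2, h3⟩ := findOuter_some rs g rs.length 0 (i, j) hp
      simp only at h1 h2 h3
      have hstep : Step g rs ((rs.set i ((rs[i]!).join (rs[j]!))).eraseIdx j) :=
        ⟨i, j, h1, h2, by rw [← nearB_eq]; exact h3, rfl⟩
      have hlen : ((rs.set i ((rs[i]!).join (rs[j]!))).eraseIdx j).length + 1 = rs.length :=
        length_doStep rs i j h2
      obtain ⟨ihs, ihn⟩ := ih ((rs.set i ((rs[i]!).join (rs[j]!))).eraseIdx j) (by omega)
      exact ⟨Relation.ReflTransGen.head hstep ihs, ihn⟩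

lemma mergeAll_small (rs : List Region) (g : Int) (h : rs.length ≤ 1) :
    mergeAll g (rs.length + 1) rs = rs := by
  have hsim := mergeAll_sim g (rs.length + 1) rs (by omega)
  rcases Relation.ReflTransGen.cases_head hsim.1 with heq | ⟨m, hstep, -⟩
  · exact heq.symm
  · obtain ⟨i, j, h1, h2, -, -⟩ := hstep
    omega

-- merging agrees for every list of regions and every gap: both loops perform rewriting steps
-- and stop at a normal form, and normal forms are unique
lemma merge_eq (l : List Region) (g : Int) :
    merge_nearby_regions l g = (if 0 < g then mergeAll g (l.length + 1) l else l) := by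
  unfold merge_nearby_regions
  rw [List.map_id']
  by_cases hg : g ≤ 0
  · rw [if_pos (Or.inl hg), if_neg (by omega)]
  · by_cases hlen : l.length ≤ 1
    · rw [if_pos (Or.inr hlen), if_pos (by omega), mergeAll_small l g hlen]
    · rw [if_neg (by push_neg; omega), if_pos (by omega)]
      have h1 := outer_sim g (l.length + 1) l (by omega)
      have h2 := mergeAll_sim g (l.length + 1) l (by omega)
      exact NF_unique g l.length l _ _ le_rfl h1.1 h2.1 h1.2 h2.2

lemma fold_filter (region_bounds : List (List (String × Int))) (min_region_pixels padding_pixels width height : Int) :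
    ∀ (acc : List Region) (c : Int),
    region_bounds.foldl (fun (acc : List Region × Int) region =>
      if readInt region "pixel_count" < min_region_pixels then (acc.1, acc.2 + 1)
      else (acc.1 ++ [⟨max 0 (readInt region "min_x" - padding_pixels),
                      max 0 (readInt region "min_y" - padding_pixels),
                      min (width - 1) (readInt region "max_x" + padding_pixels),
                      min (height - 1) (readInt region "max_y" + padding_pixels),
                      readInt region "pixel_count"⟩], acc.2)) (acc, c)
    = (acc ++ region_bounds.filterMap (fun region =>
        if min_region_pixels ≤ readInt region "pixel_count" then
          some (⟨max 0 (readInt region "min_x" - padding_pixels),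
                 max 0 (readInt region "min_y" - padding_pixels),
                 min (width - 1) (readInt region "max_x" + padding_pixels),
                 min (height - 1) (readInt region "max_y" + padding_pixels),
                 readInt region "pixel_count"⟩ : Region)
        else none),
       c + (region_bounds.countP (fun region => readInt region "pixel_count" < min_region_pixels) : Nat)) := by
  induction region_bounds with
  | nil => simp
  | cons r t ih =>
    intro acc c
    simp only [List.foldl_cons, List.filterMap_cons, List.countP_cons]
    by_cases h : readInt r "pixel_count" < min_region_pixels
    · rw [if_pos h, if_neg (by omega), ih]
      simp [h]
      try push_cast
      try ring
    · rw [if_neg h, if_pos (by omega), ih]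
      simp [h]
      try push_cast
      try ring

-- ===== VERDICT (by name: the statement is the Claim_ definition above) =====
theorem finalize_regions_py_spec : Claim_equal_finalize_regions_py := by
  intro region_bounds min_region_pixels padding_pixels merge_gap_pixels width height _dom _pre
  unfold Spec_finalize_regions_py finalize_regions_py finalize_regions_py_alt
  dsimp only
  rw [fold_filter region_bounds min_region_pixels padding_pixels width height [] 0, merge_eq]
  simp
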